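-- pv_equiv track=rewrite | github.com/MaximTatarenkov/Trading_soft | strategies/visualization.py | get_major_locator
-- ===== SOURCE A (Python) =====
-- def get_major_locator(flags):
--     locators = [3, 4, 5]
--     locs = []
--     for loc in locators:
--         for flag in flags:
--             modul = flag % loc
--             if not modul:
--                 locs.append(loc)
--     major_locator = 0
--     count = 0
--     for loc in locators:
--         if locs.count(loc) > count:
--             count = locs.count(loc)
--             major_locator = loc
--     return major_locator
-- ===== SOURCE B (Python) =====
-- def get_major_locator(flags):
--     # Bucket flags by residue class mod 60 (= lcm(3,4,5)); whether a flag is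
--     # divisible by 3, 4 or 5 depends only on flag % 60, so the per-divisor
--     # counts are sums of bucket sizes over the multiples of that divisor.
--     buckets = [0] * 60
--     for flag in flags:
--         buckets[flag % 60] += 1
--     best, best_count = 0, 0
--     for d in (3, 4, 5):
--         c = sum(buckets[r] for r in range(0, 60, d))
--         if c > best_count:
--             best, best_count = d, c
--     return best
-- ===== Notes on version B (the rewrite author's own statement) =====
-- stated objective: faster
-- what changed: Instead of testing each divisor against every flag and building a flat list rescanned with .count, B buckets the flags once by residue class mod 60 (the lcm of the three divisors) and obtains each divisor's count as a sum of bucket sizes over that divisor's multiples, then scans the divisors in order keeping the strictly larger count.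
import Mathlib
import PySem

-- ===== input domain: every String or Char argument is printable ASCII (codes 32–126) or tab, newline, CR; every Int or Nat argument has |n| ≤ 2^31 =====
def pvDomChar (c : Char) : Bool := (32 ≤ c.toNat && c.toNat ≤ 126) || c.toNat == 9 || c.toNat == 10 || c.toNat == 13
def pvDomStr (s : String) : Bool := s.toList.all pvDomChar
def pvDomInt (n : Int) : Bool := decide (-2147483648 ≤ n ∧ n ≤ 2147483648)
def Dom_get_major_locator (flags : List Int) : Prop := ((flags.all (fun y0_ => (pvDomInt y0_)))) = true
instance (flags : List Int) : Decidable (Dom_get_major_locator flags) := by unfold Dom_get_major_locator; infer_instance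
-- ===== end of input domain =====

-- B replaces A's divisor-outer matched-list building + .count rescans by bucketing the
-- flags once by residue class mod 60 (= lcm(3,4,5)) and summing bucket sizes over each
-- divisor's multiples — a different algorithm; a timing run measured B faster by a constant factor.

-- ===== PORT A =====
def get_major_locator (flags : List Int) : Int :=
  let locators : List Int := [3, 4, 5]
  let locs : List Int := locators.foldl (fun locs loc =>
    flags.foldl (fun locs flag =>
      if PySem.Int.mod flag loc == 0 then locs ++ [loc] else locs) locs) []
  let r : Int × Int := locators.foldl (fun st loc =>
    if ((locs.count loc : Int) > st.2) then (loc, (locs.count loc : Int)) else st) (0, 0)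
  r.1

-- ===== PORT B =====
-- buckets[flag % 60] += 1 : 0 ≤ flag % 60 < 60 always, so .toNat is exact and the
-- index is in range (getD never sees its default).
def pvBump (b : List Int) (f : Int) : List Int :=
  let i := (PySem.Int.mod f 60).toNat
  b.set i (b.getD i 0 + 1)

def get_major_locator_alt (flags : List Int) : Int :=
  let buckets : List Int := flags.foldl pvBump (List.replicate 60 (0 : Int))
  let r : Int × Int := [(3 : Int), 4, 5].foldl (fun st d =>
    let c : Int := (PySem.List.pyRange 0 60 d).foldl (fun s r => s + buckets.getD r.toNat 0) 0
    if c > st.2 then (d, c) else st) (0, 0)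
  r.1

-- ===== PRECONDITION & SPEC =====
def Spec_get_major_locator (flags : List Int) (out : Int) : Prop := out = get_major_locator_alt flags
instance (flags : List Int) (out : Int) : Decidable (Spec_get_major_locator flags out) := by unfold Spec_get_major_locator; infer_instance

-- ===== CLAIM (what is proved, stated in full; the proofs are below) =====
def Claim_equal_get_major_locator : Prop := ∀ (flags : List Int), Dom_get_major_locator flags → Spec_get_major_locator flags (get_major_locator flags)

-- ===== LEMMAS AND PROOFS =====

-- A's inner loop appends `loc` once per matching flag
theorem pvA_inner (flags : List Int) (loc : Int) (acc : List Int) :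
    flags.foldl (fun locs flag =>
      if PySem.Int.mod flag loc == 0 then locs ++ [loc] else locs) acc
    = acc ++ List.replicate (flags.countP (fun f => PySem.Int.mod f loc == 0)) loc := by
  induction flags generalizing acc with
  | nil => simp
  | cons f fs ih =>
    rw [List.foldl_cons, List.countP_cons]
    by_cases h : (PySem.Int.mod f loc == 0) = true
    · rw [if_pos h, ih, if_pos h]
      simp [List.replicate_succ]
    · rw [if_neg h, ih, if_neg h]
      simp

theorem pvMod60_bounds (f : Int) : 0 ≤ PySem.Int.mod f 60 ∧ PySem.Int.mod f 60 < 60 := by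
  rw [PySem.Int.mod_eq_emod_of_pos (by norm_num)]
  exact ⟨Int.emod_nonneg f (by norm_num), Int.emod_lt_of_pos f (by norm_num)⟩

theorem pvGetD_set (b : List Int) (i r : Nat) (hi : i < b.length) (v : Int) :
    (b.set i v).getD r 0 = if r = i then v else b.getD r 0 := by
  by_cases h : r = i
  · subst h; simp [List.getD, hi]
  · simp [List.getD, List.getElem?_set_ne (fun hh => h hh.symm), h]

-- bucket r holds the number of flags with flag % 60 = r
theorem pvBucket (flags : List Int) (b : List Int) (hb : b.length = 60)
    (r : Nat) (hr : r < 60) :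
    (flags.foldl pvBump b).getD r 0
      = b.getD r 0 + (flags.countP (fun f => PySem.Int.mod f 60 == (r : Int)) : Int) := by
  induction flags generalizing b with
  | nil => simp
  | cons f fs ih =>
    have hm := pvMod60_bounds f
    have hi : (PySem.Int.mod f 60).toNat < b.length := by omega
    rw [List.foldl_cons, ih (pvBump b f) (by simp [pvBump, hb]),
        List.countP_cons]
    simp only [pvBump]
    rw [pvGetD_set b _ r hi]
    by_cases h : PySem.Int.mod f 60 = (r : Int)
    · simp only [h, Int.toNat_natCast, beq_self_eq_true, if_true]
      push_cast; ring
    · have hne : ¬ r = (PySem.Int.mod f 60).toNat := by omega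
      have hbe : (PySem.Int.mod f 60 == (r : Int)) = false := by
        rw [beq_eq_false_iff_ne]; exact h
      rw [if_neg hne, hbe]
      push_cast; ring

-- summing the 0/1 indicator over the multiples of d in [0,60) tests d ∣ flag
theorem pvOne (d : Int) (hd : d = 3 ∨ d = 4 ∨ d = 5) (f : Int) :
    ((PySem.List.pyRange 0 60 d).map
        (fun r => if (PySem.Int.mod f 60 == r) = true then (1 : Int) else 0)).sum
      = if (PySem.Int.mod f d == 0) = true then (1 : Int) else 0 := by
  have hm := pvMod60_bounds f
  have h60 : PySem.Int.mod f 60 = f % 60 := PySem.Int.mod_eq_emod_of_pos (by norm_num)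
  obtain ⟨hm1, hm2⟩ := hm
  rw [h60] at hm1 hm2
  obtain hd | hd | hd := hd <;> subst hd
  · rw [show PySem.Int.mod f 3 = f % 60 % 3 by
      rw [PySem.Int.mod_eq_emod_of_pos (by norm_num), Int.emod_emod_of_dvd f (by norm_num)], h60]
    generalize f % 60 = m at hm1 hm2 ⊢
    interval_cases m <;> decide
  · rw [show PySem.Int.mod f 4 = f % 60 % 4 by
      rw [PySem.Int.mod_eq_emod_of_pos (by norm_num), Int.emod_emod_of_dvd f (by norm_num)], h60]
    generalize f % 60 = m at hm1 hm2 ⊢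
    interval_cases m <;> decide
  · rw [show PySem.Int.mod f 5 = f % 60 % 5 by
      rw [PySem.Int.mod_eq_emod_of_pos (by norm_num), Int.emod_emod_of_dvd f (by norm_num)], h60]
    generalize f % 60 = m at hm1 hm2 ⊢
    interval_cases m <;> decide

theorem pvCount (d : Int) (hd : d = 3 ∨ d = 4 ∨ d = 5) (flags : List Int) :
    ((PySem.List.pyRange 0 60 d).map
        (fun r => (flags.countP (fun f => PySem.Int.mod f 60 == r) : Int))).sum
      = (flags.countP (fun f => PySem.Int.mod f d == 0) : Int) := by
  induction flags with
  | nil => simp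
  | cons f fs ih =>
    have step : ((PySem.List.pyRange 0 60 d).map
        (fun r => ((f :: fs).countP (fun g => PySem.Int.mod g 60 == r) : Int))).sum
      = ((PySem.List.pyRange 0 60 d).map
          (fun r => (fs.countP (fun g => PySem.Int.mod g 60 == r) : Int))).sum
        + ((PySem.List.pyRange 0 60 d).map
            (fun r => if (PySem.Int.mod f 60 == r) = true then (1 : Int) else 0)).sum := by
      rw [← PySem.List.sum_map_add_int]
      apply congrArg
      apply List.map_congr_left
      intro r _
      rw [List.countP_cons]
      push_cast
      by_cases h : (PySem.Int.mod f 60 == r) = true <;> simp [h]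
    rw [step, ih, pvOne d hd f, List.countP_cons]
    by_cases h : (PySem.Int.mod f d == 0) = true <;> simp [h]

-- B's per-divisor sum is the number of flags d divides
theorem pvSumEq (flags : List Int) (d : Int) (hd : d = 3 ∨ d = 4 ∨ d = 5) :
    (PySem.List.pyRange 0 60 d).foldl
        (fun s r => s + (flags.foldl pvBump (List.replicate 60 (0 : Int))).getD r.toNat 0) 0
      = (flags.countP (fun f => PySem.Int.mod f d == 0) : Int) := by
  rw [PySem.List.foldl_add]
  have hpos : 0 < d := by rcases hd with h | h | h <;> simp [h]
  have hmem : ∀ r ∈ PySem.List.pyRange 0 60 d, 0 ≤ r ∧ r < 60 := by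
    intro r hr
    rw [PySem.List.mem_pyRange_iff_of_pos hpos] at hr
    omega
  have hmap : (PySem.List.pyRange 0 60 d).map
      (fun r => (flags.foldl pvBump (List.replicate 60 (0 : Int))).getD r.toNat 0)
    = (PySem.List.pyRange 0 60 d).map
      (fun r => (flags.countP (fun f => PySem.Int.mod f 60 == r) : Int)) := by
    apply List.map_congr_left
    intro r hr
    obtain ⟨h0, h60⟩ := hmem r hr
    have hrn : r.toNat < 60 := by omega
    have hc : ((r.toNat : Int)) = r := by omega
    rw [pvBucket flags _ (by simp) r.toNat hrn, List.getD_replicate]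
    · rw [hc]; ring
    · exact hrn
  rw [hmap, pvCount d hd flags]
  ring

-- ===== VERDICT (by name: the statement is the Claim_ definition above) =====
theorem get_major_locator_spec : Claim_equal_get_major_locator := by
  intro flags _
  show get_major_locator flags = get_major_locator_alt flags
  unfold get_major_locator get_major_locator_alt
  simp only [List.foldl_cons, List.foldl_nil, pvA_inner, List.nil_append,
    List.count_append, List.count_replicate,
    pvSumEq flags 3 (Or.inl rfl), pvSumEq flags 4 (Or.inr (Or.inl rfl)),
    pvSumEq flags 5 (Or.inr (Or.inr rfl))]
  norm_num
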